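-- pv_equiv track=rewrite | github.com/FelipeResende/python | func_lista.py | list_from_str
-- ===== SOURCE A (Python) =====
-- def list_from_str(str):
--     lista = []
--     l = []
--     for i in str.split():
--         if i.isalpha():
--             if l:
--                 lista.append(l)
--                 l = []
--         l.append(i)
--     if l:
--         lista.append(l)
--     return lista
-- ===== SOURCE B (Python) =====
-- def list_from_str(str):
--     # Span-splitting: each group is a token followed by the run of non-alpha tokens after it.
--     tokens = str.split()
--     out = []
--     i = 0
--     n = len(tokens)
--     while i < n:
--         j = i + 1
--         while j < n and not tokens[j].isalpha():
--             j += 1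
--         out.append(tokens[i:j])
--         i = j
--     return out
-- ===== Notes on version B (the rewrite author's own statement) =====
-- stated objective: alternative
-- what changed: Replaced A's single fold with a flush-on-alpha accumulator by span splitting: each group is the current token plus the following run of non-alphabetic tokens, consumed group by group.
import Mathlib
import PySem

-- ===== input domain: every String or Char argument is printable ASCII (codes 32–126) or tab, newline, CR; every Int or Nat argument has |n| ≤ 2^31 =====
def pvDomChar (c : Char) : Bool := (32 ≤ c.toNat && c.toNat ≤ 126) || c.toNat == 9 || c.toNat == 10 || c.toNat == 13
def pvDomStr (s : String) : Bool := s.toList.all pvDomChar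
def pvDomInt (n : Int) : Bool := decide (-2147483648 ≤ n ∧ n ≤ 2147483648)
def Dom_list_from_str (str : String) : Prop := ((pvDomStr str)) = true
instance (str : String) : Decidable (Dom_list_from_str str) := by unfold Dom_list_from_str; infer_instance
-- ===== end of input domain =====

-- B replaces A's flush-on-alpha accumulator fold by span splitting (each group = a token
-- plus the following run of non-alphabetic tokens); objective: alternative decomposition.


-- ===== PORT A =====
-- one loop iteration of A: flush the current group l when the token is alphabetic, then append
def pvStepA (st : List (List String) × List String) (i : String) :
    List (List String) × List String :=
  if PySem.Str.strIsalpha i then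
    if st.2 ≠ [] then (st.1 ++ [st.2], [] ++ [i]) else (st.1, st.2 ++ [i])
  else (st.1, st.2 ++ [i])

def list_from_str (str : String) : List (List String) :=
  let st := (PySem.Str.split₀ str).foldl pvStepA ([], [])
  if st.2 ≠ [] then st.1 ++ [st.2] else st.1

-- ===== PORT B =====
-- outer while loop of B: consume one group = head token + following run of non-alpha tokens
def pvGroups : List String → List (List String)
  | [] => []
  | t :: rest =>
      (t :: rest.takeWhile (fun s => !PySem.Str.strIsalpha s)) ::
      pvGroups (rest.dropWhile (fun s => !PySem.Str.strIsalpha s))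
termination_by l => l.length
decreasing_by
  simp only [List.length_cons]
  exact Nat.lt_succ_of_le (List.length_dropWhile_le _ rest)

def list_from_str_alt (str : String) : List (List String) :=
  pvGroups (PySem.Str.split₀ str)

-- ===== PRECONDITION & SPEC =====
def Spec_list_from_str (str : String) (out : List (List String)) : Prop := out = list_from_str_alt str
instance (str : String) (out : List (List String)) : Decidable (Spec_list_from_str str out) := by unfold Spec_list_from_str; infer_instance

-- ===== CLAIM (what is proved, stated in full; the proofs are below) =====
def Claim_equal_list_from_str : Prop := ∀ (str : String), Dom_list_from_str str → Spec_list_from_str str (list_from_str str)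

-- ===== LEMMAS AND PROOFS =====

-- A's fold only ever appends finished groups: the already-collected list hoists out of the fold
theorem pvFoldA_hoist (ts : List String) (lista : List (List String)) (l : List String) :
    ts.foldl pvStepA (lista, l) =
      (lista ++ (ts.foldl pvStepA ([], l)).1, (ts.foldl pvStepA ([], l)).2) := by
  induction ts generalizing lista l with
  | nil => simp
  | cons t ts ih =>
    simp only [List.foldl_cons, pvStepA]
    by_cases ha : PySem.Str.strIsalpha t
    · by_cases hl : l = []
      · simp only [ha, hl, ne_eq, not_true_eq_false, if_false, List.nil_append, ite_self]
        exact ih lista [t]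
      · simp only [ha, if_true, hl, ne_eq, not_false_eq_true, if_true, List.nil_append]
        rw [ih (lista ++ [l]) [t], ih [l] [t]]
        simp
    · simp only [ha, if_false, Bool.false_eq_true]
      exact ih lista (l ++ [t])

-- main invariant: finishing A's fold started with a nonempty current group l yields
-- (l ++ run of non-alpha tokens) followed by B's groups of the remaining tokens
theorem pvFoldA_spec (ts : List String) (l : List String) (hl : l ≠ []) :
    (if ((ts.foldl pvStepA ([], l)).2) ≠ [] then
        (ts.foldl pvStepA ([], l)).1 ++ [(ts.foldl pvStepA ([], l)).2]
      else (ts.foldl pvStepA ([], l)).1) =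
      (l ++ ts.takeWhile (fun s => !PySem.Str.strIsalpha s)) ::
        pvGroups (ts.dropWhile (fun s => !PySem.Str.strIsalpha s)) := by
  induction ts generalizing l with
  | nil =>
    simp only [List.foldl_nil, List.takeWhile_nil, List.dropWhile_nil, List.append_nil]
    rw [pvGroups]
    simp [hl]
  | cons t ts ih =>
    by_cases ha : PySem.Str.strIsalpha t = true
    · have hstep : pvStepA ([], l) t = ([l], [t]) := by
        simp only [pvStepA, ha, if_true, ne_eq, hl, not_false_eq_true, List.nil_append]
      have h2 := ih [t] (by simp)
      simp only [List.singleton_append] at h2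
      simp only [List.foldl_cons, hstep, pvFoldA_hoist ts [l] [t],
        List.takeWhile_cons, List.dropWhile_cons, ha, Bool.not_true, Bool.false_eq_true,
        if_false, List.append_nil]
      rw [pvGroups]
      by_cases hY : (ts.foldl pvStepA ([], [t])).2 = []
      · simp only [hY, ne_eq, not_true_eq_false, if_false] at h2 ⊢
        rw [← h2]; simp
      · simp only [hY, ne_eq, not_false_eq_true, if_true] at h2 ⊢
        rw [← h2]; simp
    · have ha' : PySem.Str.strIsalpha t = false := by
        revert ha; cases PySem.Str.strIsalpha t <;> simp
      have hstep : pvStepA ([], l) t = ([], l ++ [t]) := by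
        simp only [pvStepA, ha', Bool.false_eq_true, if_false, List.nil_append]
      have h2 := ih (l ++ [t]) (by simp)
      simp only [List.foldl_cons, hstep, List.takeWhile_cons, List.dropWhile_cons, ha',
        Bool.not_false, if_true]
      rw [h2]; simp

-- ===== VERDICT (by name: the statement is the Claim_ definition above) =====
theorem list_from_str_spec : Claim_equal_list_from_str := by
  intro s _
  unfold Spec_list_from_str list_from_str list_from_str_alt
  cases h : PySem.Str.split₀ s with
  | nil => rw [pvGroups]; simp
  | cons t ts =>
    have hstep : pvStepA ([], []) t = ([], [t]) := by
      simp only [pvStepA, ne_eq, not_true_eq_false, if_false, List.nil_append, ite_self]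
    simp only [List.foldl_cons, hstep]
    rw [pvFoldA_spec ts [t] (by simp), pvGroups]
    simp
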